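-- pv_equiv track=rewrite | github.com/s4mehotblack/ClusterME | gene_set_match.py | find_prefix_matches
-- ===== SOURCE A (Python) =====
-- def find_prefix_matches(master_genes, gene_set, min_length=3):
--     """Find genes where the beginning of the gene name matches."""
--     matches = set()
--     for master_gene in master_genes:
--         for set_gene in gene_set:
--             if len(master_gene) >= min_length and len(set_gene) >= min_length:
--                 if master_gene.startswith(set_gene) or set_gene.startswith(master_gene):
--                     matches.add(f"{master_gene}~{set_gene}")
--                     break
--     return matches
-- ===== SOURCE B (Python) =====
-- def find_prefix_matches(master_genes, gene_set, min_length=3):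
--     """Index every prefix of gene_set once (prefix -> min index), then query each master gene once."""
--     exact = {}
--     pref = {}
--     for j, g in enumerate(gene_set):
--         if len(g) >= min_length:
--             if g not in exact:
--                 exact[g] = j
--             for k in range(len(g) + 1):
--                 p = g[:k]
--                 if p not in pref:
--                     pref[p] = j
--     lo = max(min_length, 0)
--     matches = set()
--     for m in master_genes:
--         if len(m) < min_length:
--             continue
--         best = pref.get(m)
--         for k in range(lo, len(m)):
--             j = exact.get(m[:k])
--             if j is not None and (best is None or j < best):
--                 best = j
--         if best is not None:
--             matches.add(f"{m}~{gene_set[best]}")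
--     return matches
-- ===== Notes on version B (the rewrite author's own statement) =====
-- stated objective: faster
-- what changed: Replaces the nested master x gene_set scan with a one-pass prefix index over gene_set (every prefix of each qualifying gene mapped to its minimum index), so each master gene is answered by O(len) dictionary lookups instead of a scan of gene_set.
import Mathlib
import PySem

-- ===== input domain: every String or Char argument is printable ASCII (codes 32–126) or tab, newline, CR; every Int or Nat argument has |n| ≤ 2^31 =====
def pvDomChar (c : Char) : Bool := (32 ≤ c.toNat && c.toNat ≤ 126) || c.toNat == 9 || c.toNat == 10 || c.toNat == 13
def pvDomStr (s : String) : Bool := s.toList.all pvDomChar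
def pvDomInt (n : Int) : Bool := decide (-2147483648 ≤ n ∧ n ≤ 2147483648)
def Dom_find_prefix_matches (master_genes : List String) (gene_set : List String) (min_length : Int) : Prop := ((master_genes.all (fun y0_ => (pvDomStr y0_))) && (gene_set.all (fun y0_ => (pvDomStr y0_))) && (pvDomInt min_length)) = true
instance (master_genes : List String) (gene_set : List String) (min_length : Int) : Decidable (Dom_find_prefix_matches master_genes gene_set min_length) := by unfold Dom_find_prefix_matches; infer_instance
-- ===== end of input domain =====

-- B replaces A's nested scan by a prefix index over gene_set built once (objective: faster, asymptotic).

-- ===== PORT A =====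
-- inner 'for set_gene in gene_set: … break' loop of A
def pvA_inner (min_length : Int) (master_gene : String) (gs : List String) (mset : PySem.Set String) : PySem.Set String :=
  match gs with
  | [] => mset
  | set_gene :: rest =>
    if min_length ≤ PySem.Str.len master_gene ∧ min_length ≤ PySem.Str.len set_gene then
      if PySem.Str.startswith master_gene set_gene || PySem.Str.startswith set_gene master_gene then
        PySem.Set.add mset (master_gene ++ "~" ++ set_gene)
      else pvA_inner min_length master_gene rest mset
    else pvA_inner min_length master_gene rest mset

def find_prefix_matches (master_genes : List String) (gene_set : List String) (min_length : Int) : List String :=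
  master_genes.foldl (fun mset m => pvA_inner min_length m gene_set mset) PySem.Set.empty

-- ===== PORT B =====
-- one enumerate step of B's index-building loop: exact gene -> min index, every prefix -> min index
def pvB_step (min_length : Int) (ep : PySem.Dict String Int × PySem.Dict String Int) (jg : Int × String) :
    PySem.Dict String Int × PySem.Dict String Int :=
  let j := jg.1
  let g := jg.2
  if min_length ≤ PySem.Str.len g then
    let e := if ep.1.contains g then ep.1 else ep.1.insert g j
    let pr := (PySem.List.pyRange 0 (PySem.Str.len g + 1) 1).foldl
      (fun d k =>
        let p := PySem.Str.slice g none (some k)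
        if d.contains p then d else d.insert p j) ep.2
    (e, pr)
  else ep

-- B's query loop over the proper prefixes of one master gene
def pvB_best (exact : PySem.Dict String Int) (lo : Int) (m : String) (best0 : Option Int) : Option Int :=
  (PySem.List.pyRange lo (PySem.Str.len m) 1).foldl
    (fun best k =>
      match exact.get? (PySem.Str.slice m none (some k)) with
      | none => best
      | some j =>
        match best with
        | none => some j
        | some b => if j < b then some j else some b) best0

def find_prefix_matches_alt (master_genes : List String) (gene_set : List String) (min_length : Int) : List String :=
  let ep := (PySem.List.enumerate gene_set 0).foldl (pvB_step min_length) (PySem.Dict.empty, PySem.Dict.empty)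
  let lo := max min_length 0
  master_genes.foldl (fun mset m =>
    if PySem.Str.len m < min_length then mset
    else
      match pvB_best ep.1 lo m (ep.2.get? m) with
      | none => mset
      | some j => PySem.Set.add mset (m ++ "~" ++ PySem.List.pyGetD gene_set j "")) PySem.Set.empty

-- ===== PRECONDITION & SPEC =====
def Spec_find_prefix_matches (master_genes : List String) (gene_set : List String) (min_length : Int) (out : List String) : Prop := out = find_prefix_matches_alt master_genes gene_set min_length
instance (master_genes : List String) (gene_set : List String) (min_length : Int) (out : List String) : Decidable (Spec_find_prefix_matches master_genes gene_set min_length out) := by unfold Spec_find_prefix_matches; infer_instance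

-- ===== CLAIM (what is proved, stated in full; the proofs are below) =====
def Claim_equal_find_prefix_matches : Prop := ∀ (master_genes : List String) (gene_set : List String) (min_length : Int), Dom_find_prefix_matches master_genes gene_set min_length → Spec_find_prefix_matches master_genes gene_set min_length (find_prefix_matches master_genes gene_set min_length)

-- ===== LEMMAS AND PROOFS =====

-- the match condition both programs decide for a (master, set_gene) pair
def pvCond (L : Int) (m g : String) : Bool :=
  (decide (L ≤ PySem.Str.len m) && decide (L ≤ PySem.Str.len g)) &&
    (PySem.Str.startswith m g || PySem.Str.startswith g m)

-- "o is the index (as an Int) of the first position satisfying Q, or none if there is none"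
def pvIsFirst (Q : Nat → Prop) (o : Option Int) : Prop :=
  match o with
  | none => ∀ i, ¬ Q i
  | some j => ∃ i : Nat, j = (i : Int) ∧ Q i ∧ ∀ i' < i, ¬ Q i'

-- A's inner loop returns the first matching set_gene
theorem pvA_inner_eq (L : Int) (m : String) (gs : List String) (acc : PySem.Set String) :
    pvA_inner L m gs acc =
      match gs.find? (pvCond L m) with
      | none => acc
      | some g => PySem.Set.add acc (m ++ "~" ++ g) := by
  induction gs with
  | nil => rfl
  | cons g rest ih =>
    rw [pvA_inner]
    by_cases h1 : L ≤ PySem.Str.len m ∧ L ≤ PySem.Str.len g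
    · by_cases h2 : (PySem.Str.startswith m g || PySem.Str.startswith g m) = true
      · have hc : pvCond L m g = true := by
          unfold pvCond
          rw [decide_eq_true h1.1, decide_eq_true h1.2, h2]
          rfl
        rw [if_pos h1, if_pos h2, List.find?_cons_of_pos hc]
      · have hc : pvCond L m g = false := by
          unfold pvCond
          rw [Bool.not_eq_true] at h2
          rw [h2, Bool.and_false]
        rw [if_pos h1, if_neg h2, List.find?_cons_of_neg (by rw [hc]; exact Bool.false_ne_true), ih]
    · have hc : pvCond L m g = false := by
        unfold pvCond
        rcases not_and_or.mp h1 with h | h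
        · rw [decide_eq_false h, Bool.false_and, Bool.false_and]
        · rw [decide_eq_false h, Bool.and_false, Bool.false_and]
      rw [if_neg h1, List.find?_cons_of_neg (by rw [hc]; exact Bool.false_ne_true), ih]

theorem pvIsFirst_unique {Q : Nat → Prop} {o o' : Option Int}
    (h : pvIsFirst Q o) (h' : pvIsFirst Q o') : o = o' := by
  cases o with
  | none =>
    cases o' with
    | none => rfl
    | some j =>
      obtain ⟨i, rfl, hQ, _⟩ := h'
      exact absurd hQ (h i)
  | some j =>
    obtain ⟨i, rfl, hQ, hmin⟩ := h
    cases o' with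
    | none => exact absurd hQ (h' i)
    | some j' =>
      obtain ⟨i', rfl, hQ', hmin'⟩ := h'
      rcases lt_trichotomy i i' with hl | he | hl
      · exact absurd hQ (hmin' i hl)
      · rw [he]
      · exact absurd hQ' (hmin i' hl)

theorem pvIsFirst_congr {Q Q' : Nat → Prop} {o : Option Int}
    (hiff : ∀ i, Q i ↔ Q' i) (h : pvIsFirst Q o) : pvIsFirst Q' o := by
  cases o with
  | none => exact fun i hq => h i ((hiff i).mpr hq)
  | some j =>
    obtain ⟨i, rfl, hQ, hmin⟩ := h
    exact ⟨i, rfl, (hiff i).mp hQ, fun i' hi' hq => hmin i' hi' ((hiff i').mpr hq)⟩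

-- one insert-if-absent step, at the lookup level
theorem pv_insertAbsent_get? (d : PySem.Dict String Int) (key : String) (j : Int) (q : String) :
    (if d.contains key then d else d.insert key j).get? q
      = (d.get? q).or (if key = q then some j else none) := by
  by_cases hk : key = q
  · subst hk
    cases hg : d.get? key with
    | none =>
      have hc : d.contains key = false := by
        rw [← PySem.Dict.get?_eq_none_iff_contains]
        exact hg
      rw [if_neg (by rw [hc]; exact Bool.false_ne_true), PySem.Dict.get?_insert_self]
      simp
    | some v =>
      have hc : d.contains key = true := by
        rw [PySem.Dict.contains_eq_isSome_get?, hg]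
        rfl
      rw [if_pos hc, hg]
      simp
  · have hget : (if d.contains key then d else d.insert key j).get? q = d.get? q := by
      by_cases hc : d.contains key = true
      · rw [if_pos hc]
      · rw [if_neg hc, PySem.Dict.get?_insert_of_ne _ _ (fun hh => hk hh.symm)]
    rw [hget, if_neg hk]
    simp

-- the inner prefix loop builds a first-insertion-wins dictionary
theorem pv_foldl_insertAbsent_get? (ks : List Int) (f : Int → String) (j : Int)
    (d : PySem.Dict String Int) (q : String) :
    ((ks.foldl (fun d k =>
        let p := f k
        if d.contains p then d else d.insert p j) d).get? q)
      = (d.get? q).or (if ∃ k ∈ ks, f k = q then some j else none) := by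
  induction ks generalizing d with
  | nil => simp
  | cons k ks ih =>
    simp only [List.foldl_cons]
    rw [ih]
    show ((if d.contains (f k) then d else d.insert (f k) j).get? q).or _ = _
    rw [pv_insertAbsent_get?, Option.or_assoc]
    congr 1
    by_cases hk : f k = q
    · rw [if_pos hk, if_pos (show ∃ x ∈ k :: ks, f x = q from ⟨k, List.mem_cons_self, hk⟩)]
      simp
    · rw [if_neg hk, Option.none_or]
      by_cases he : ∃ x ∈ ks, f x = q
      · rw [if_pos he]
        obtain ⟨x, hx, hfx⟩ := he
        rw [if_pos (show ∃ x ∈ k :: ks, f x = q from ⟨x, List.mem_cons_of_mem _ hx, hfx⟩)]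
      · rw [if_neg he]
        rw [if_neg (show ¬ ∃ x ∈ k :: ks, f x = q from ?_)]
        rintro ⟨x, hx, hfx⟩
        rcases List.mem_cons.mp hx with rfl | hx'
        · exact hk hfx
        · exact he ⟨x, hx', hfx⟩

-- the keys the prefix loop inserts for g are exactly the prefixes of g
theorem pv_slice_prefix_iff (g q : String) :
    (∃ k ∈ PySem.List.pyRange 0 (PySem.Str.len g + 1) 1, PySem.Str.slice g none (some k) = q)
      ↔ PySem.Str.startswith g q = true := by
  rw [PySem.Str.startswith_eq, PySem.Chars.startswith_iff]
  constructor
  · rintro ⟨k, hk, rfl⟩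
    rw [PySem.List.mem_pyRange_one] at hk
    have h0 : (0:Int) ≤ k := hk.1
    have hsl : (PySem.Str.slice g none (some k)).toList = g.toList.take k.toNat := by
      rw [PySem.Str.toList_slice, PySem.Chars.slice_eq_listSlice, PySem.List.slice_to _ h0]
    rw [hsl]
    exact List.take_prefix _ _
  · intro hpre
    refine ⟨(q.toList.length : Int), ?_, ?_⟩
    · rw [PySem.List.mem_pyRange_one]
      have := hpre.length_le
      rw [PySem.Str.len_eq]
      constructor
      · exact_mod_cast Nat.zero_le _
      · omega
    · apply String.toList_inj.mp
      rw [PySem.Str.toList_slice, PySem.Chars.slice_eq_listSlice,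
        PySem.List.slice_to _ (by exact_mod_cast Nat.zero_le _)]
      rw [Int.toNat_natCast]
      exact (List.prefix_iff_eq_take.mp hpre).symm

-- the two dictionaries B builds, characterised by find? over the enumerated gene_set
theorem pvB_dicts_get? (L : Int) (gs : List String) (s : Int)
    (e0 p0 : PySem.Dict String Int) (q : String) :
    (((PySem.List.enumerate gs s).foldl (pvB_step L) (e0, p0)).1.get? q
        = (e0.get? q).or
            (((PySem.List.enumerate gs s).find?
                (fun jg => decide (L ≤ PySem.Str.len jg.2) && (jg.2 == q))).map (·.1)))
    ∧ (((PySem.List.enumerate gs s).foldl (pvB_step L) (e0, p0)).2.get? q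
        = (p0.get? q).or
            (((PySem.List.enumerate gs s).find?
                (fun jg => decide (L ≤ PySem.Str.len jg.2) && PySem.Str.startswith jg.2 q)).map (·.1))) := by
  induction gs generalizing s e0 p0 with
  | nil => simp [PySem.List.enumerate_nil]
  | cons g gs ih =>
    rw [PySem.List.enumerate_cons]
    simp only [List.foldl_cons]
    by_cases hL : L ≤ PySem.Str.len g
    · have hstep : pvB_step L (e0, p0) (s, g) =
        (if e0.contains g then e0 else e0.insert g s,
         (PySem.List.pyRange 0 (PySem.Str.len g + 1) 1).foldl
           (fun d k =>
             let p := PySem.Str.slice g none (some k)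
             if d.contains p then d else d.insert p s) p0) := by
        simp only [pvB_step]
        exact if_pos hL
      rw [hstep]
      obtain ⟨ih1, ih2⟩ := ih (s + 1)
        (if e0.contains g then e0 else e0.insert g s)
        ((PySem.List.pyRange 0 (PySem.Str.len g + 1) 1).foldl
           (fun d k =>
             let p := PySem.Str.slice g none (some k)
             if d.contains p then d else d.insert p s) p0)
      constructor
      · rw [ih1, pv_insertAbsent_get?, Option.or_assoc]
        cases hgq : (g == q) with
        | true =>
          have hq : g = q := eq_of_beq hgq
          rw [List.find?_cons_of_pos (by rw [decide_eq_true hL, hgq]; rfl)]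
          rw [if_pos hq]
          simp
        | false =>
          have hq : g ≠ q := ne_of_beq_false hgq
          rw [List.find?_cons_of_neg (by rw [hgq, Bool.and_false]; exact Bool.false_ne_true)]
          rw [if_neg hq]
          simp
      · rw [ih2, pv_foldl_insertAbsent_get?, Option.or_assoc]
        cases hsw : PySem.Str.startswith g q with
        | true =>
          rw [List.find?_cons_of_pos (by rw [decide_eq_true hL, hsw]; rfl)]
          rw [if_pos ((pv_slice_prefix_iff g q).mpr hsw)]
          simp
        | false =>
          rw [List.find?_cons_of_neg (by rw [hsw, Bool.and_false]; exact Bool.false_ne_true)]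
          rw [if_neg (fun hh => by rw [(pv_slice_prefix_iff g q).mp hh] at hsw; cases hsw)]
          simp
    · have hstep : pvB_step L (e0, p0) (s, g) = (e0, p0) := by
        simp only [pvB_step]
        exact if_neg hL
      rw [hstep]
      obtain ⟨ih1, ih2⟩ := ih (s + 1) e0 p0
      constructor
      · rw [ih1, List.find?_cons_of_neg (by rw [decide_eq_false hL, Bool.false_and]; exact Bool.false_ne_true)]
      · rw [ih2, List.find?_cons_of_neg (by rw [decide_eq_false hL, Bool.false_and]; exact Bool.false_ne_true)]

-- find? over an enumerated list, reduced to findIdx? on the underlying list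
theorem pv_enumerate_find?_map (gs : List String) (s : Int) (p : String → Bool) :
    ((PySem.List.enumerate gs s).find? (fun jg => p jg.2)).map (·.1)
      = (gs.findIdx? p).map (fun i : Nat => s + (i : Int)) := by
  induction gs generalizing s with
  | nil => simp [PySem.List.enumerate_nil]
  | cons g gs ih =>
    rw [PySem.List.enumerate_cons, List.find?_cons, List.findIdx?_cons]
    cases hp : p g with
    | true => simp
    | false =>
      simp only [Bool.false_eq_true, if_false]
      rw [ih (s + 1)]
      cases gs.findIdx? p with
      | none => simp
      | some i =>
        simp
        omega

-- findIdx? as a first-index predicate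
theorem pv_findIdx?_isFirst (gs : List String) (p : String → Bool) :
    pvIsFirst (fun i => ∃ h : i < gs.length, p gs[i])
      ((gs.findIdx? p).map (fun i : Nat => (i : Int))) := by
  cases h : gs.findIdx? p with
  | none =>
    rw [List.findIdx?_eq_none_iff] at h
    intro i hQ
    obtain ⟨hlt, hp⟩ := hQ
    have := h gs[i] (List.getElem_mem hlt)
    rw [hp] at this
    cases this
  | some i =>
    obtain ⟨hlt, hp, hmin⟩ := List.findIdx?_eq_some_iff_getElem.mp h
    exact ⟨i, rfl, ⟨hlt, hp⟩, fun i' hi' hq => by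
      obtain ⟨hlt', hp'⟩ := hq
      exact hmin i' hi' hp'⟩

-- find? over an enumerated list, as a first-index predicate
theorem pv_enumerate_find?_isFirst (gs : List String) (p : String → Bool) :
    pvIsFirst (fun i => ∃ h : i < gs.length, p gs[i])
      (((PySem.List.enumerate gs 0).find? (fun jg => p jg.2)).map (·.1)) := by
  rw [pv_enumerate_find?_map gs 0 p]
  have hz : (fun i : Nat => (0:Int) + (i:Int)) = (fun i : Nat => (i : Int)) := by
    funext i
    omega
  rw [hz]
  exact pv_findIdx?_isFirst gs p

-- the minimum-keeping combination step of B's query loop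
def pvMin2 (a b : Option Int) : Option Int :=
  match b with
  | none => a
  | some j =>
    match a with
    | none => some j
    | some x => if j < x then some j else some x

-- taking the smaller of two first indices gives the first index of the union
theorem pvIsFirst_min {Q R : Nat → Prop} {a b : Option Int}
    (ha : pvIsFirst Q a) (hb : pvIsFirst R b) :
    pvIsFirst (fun i => Q i ∨ R i) (pvMin2 a b) := by
  cases b with
  | none =>
    exact pvIsFirst_congr (fun i => ⟨Or.inl, fun h => h.resolve_right (hb i)⟩) ha
  | some j =>
    obtain ⟨ib, rfl, hR, hminb⟩ := hb
    cases a with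
    | none =>
      refine ⟨ib, rfl, Or.inr hR, fun i' hi' => ?_⟩
      rintro (hq | hr)
      · exact ha i' hq
      · exact hminb i' hi' hr
    | some x =>
      obtain ⟨ia, rfl, hQ, hmina⟩ := ha
      show pvIsFirst (fun i => Q i ∨ R i)
        (if (ib : Int) < (ia : Int) then some (ib : Int) else some (ia : Int))
      by_cases hlt : (ib : Int) < (ia : Int)
      · rw [if_pos hlt]
        have hn : ib < ia := by exact_mod_cast hlt
        refine ⟨ib, rfl, Or.inr hR, fun i' hi' => ?_⟩
        rintro (hq | hr)
        · exact hmina i' (lt_trans hi' hn) hq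
        · exact hminb i' hi' hr
      · rw [if_neg hlt]
        have hn : ia ≤ ib := by
          have : ¬ ib < ia := fun hh => hlt (by exact_mod_cast hh)
          omega
        refine ⟨ia, rfl, Or.inl hQ, fun i' hi' => ?_⟩
        rintro (hq | hr)
        · exact hmina i' hi' hq
        · exact hminb i' (lt_of_lt_of_le hi' hn) hr

-- B's minimum-keeping query fold computes the first index of the union of its classes
theorem pv_minFold_isFirst (ks : List Int) (F : Int → Option Int) (QE : Int → Nat → Prop)
    (hE : ∀ k ∈ ks, pvIsFirst (QE k) (F k)) :
    ∀ (b0 : Option Int) (Q0 : Nat → Prop), pvIsFirst Q0 b0 →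
      pvIsFirst (fun i => Q0 i ∨ ∃ k ∈ ks, QE k i)
        (ks.foldl (fun best k => pvMin2 best (F k)) b0) := by
  induction ks with
  | nil =>
    intro b0 Q0 h0
    simp only [List.foldl_nil]
    exact pvIsFirst_congr (fun i => by simp) h0
  | cons k ks ih =>
    intro b0 Q0 h0
    simp only [List.foldl_cons]
    have h1 := pvIsFirst_min h0 (hE k List.mem_cons_self)
    have h2 := ih (fun k' hk' => hE k' (List.mem_cons_of_mem _ hk')) _ _ h1
    refine pvIsFirst_congr (fun i => ?_) h2
    simp only [List.mem_cons]
    constructor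
    · rintro ((hq | he) | ⟨k', hk', he'⟩)
      · exact Or.inl hq
      · exact Or.inr ⟨k, Or.inl rfl, he⟩
      · exact Or.inr ⟨k', Or.inr hk', he'⟩
    · rintro (hq | ⟨k', hk' | hk', he'⟩)
      · exact Or.inl (Or.inl hq)
      · exact Or.inl (Or.inr (hk' ▸ he'))
      · exact Or.inr ⟨k', hk', he'⟩

-- per set_gene: membership in one of B's lookup classes is exactly A's match condition
theorem pv_union_iff_cond (L : Int) (m g : String) (hm : L ≤ PySem.Str.len m) :
    ((decide (L ≤ PySem.Str.len g) && PySem.Str.startswith g m) = true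
      ∨ ∃ k ∈ PySem.List.pyRange (max L 0) (PySem.Str.len m) 1,
          (decide (L ≤ PySem.Str.len g) && (g == PySem.Str.slice m none (some k))) = true)
    ↔ pvCond L m g = true := by
  simp only [pvCond, Bool.and_eq_true, Bool.or_eq_true, decide_eq_true_eq]
  constructor
  · rintro (⟨hLg, hsw⟩ | ⟨k, hk, hLg, hbe⟩)
    · exact ⟨⟨hm, hLg⟩, Or.inr hsw⟩
    · refine ⟨⟨hm, hLg⟩, Or.inl ?_⟩
      rw [PySem.List.mem_pyRange_one] at hk
      have h0 : (0:Int) ≤ k := le_trans (le_max_right _ _) hk.1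
      have hg : g = PySem.Str.slice m none (some k) := eq_of_beq hbe
      rw [PySem.Str.startswith_eq, PySem.Chars.startswith_iff, hg,
        PySem.Str.toList_slice, PySem.Chars.slice_eq_listSlice, PySem.List.slice_to _ h0]
      exact List.take_prefix _ _
  · rintro ⟨⟨_, hLg⟩, hsw | hsw⟩
    · -- g is a prefix of m
      by_cases hswb : PySem.Str.startswith g m = true
      · exact Or.inl ⟨hLg, hswb⟩
      · refine Or.inr ⟨(g.toList.length : Int), ?_, hLg, ?_⟩
        · rw [PySem.List.mem_pyRange_one]
          have hpre := (PySem.Chars.startswith_iff _ _).mp ((PySem.Str.startswith_eq m g) ▸ hsw)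
          have hlen := hpre.length_le
          constructor
          · rw [max_le_iff]
            refine ⟨?_, by exact_mod_cast Nat.zero_le _⟩
            rw [PySem.Str.len_eq] at hLg
            exact hLg
          · rw [PySem.Str.len_eq]
            have hne : g.toList.length ≠ m.toList.length := by
              intro he
              have : g.toList = m.toList := hpre.eq_of_length he
              apply hswb
              rw [PySem.Str.startswith_eq, PySem.Chars.startswith_iff, this]
            omega
        · have hpre := (PySem.Chars.startswith_iff _ _).mp ((PySem.Str.startswith_eq m g) ▸ hsw)
          have : g = PySem.Str.slice m none (some (g.toList.length : Int)) := by
            apply String.toList_inj.mp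
            rw [PySem.Str.toList_slice, PySem.Chars.slice_eq_listSlice,
              PySem.List.slice_to _ (by exact_mod_cast Nat.zero_le _), Int.toNat_natCast]
            exact List.prefix_iff_eq_take.mp hpre
          exact beq_iff_eq.mpr this
    · exact Or.inl ⟨hLg, hsw⟩

-- ===== VERDICT (by name: the statement is the Claim_ definition above) =====
theorem find_prefix_matches_spec : Claim_equal_find_prefix_matches := by
  intro ms gs L _
  show find_prefix_matches ms gs L = find_prefix_matches_alt ms gs L
  have hstep : ∀ (acc : PySem.Set String) (m : String),
      pvA_inner L m gs acc =
        (if PySem.Str.len m < L then acc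
         else
           match pvB_best
               ((PySem.List.enumerate gs 0).foldl (pvB_step L) (PySem.Dict.empty, PySem.Dict.empty)).1
               (max L 0) m
               (((PySem.List.enumerate gs 0).foldl (pvB_step L) (PySem.Dict.empty, PySem.Dict.empty)).2.get? m) with
           | none => acc
           | some j => PySem.Set.add acc (m ++ "~" ++ PySem.List.pyGetD gs j "")) := by
    intro acc m
    rw [pvA_inner_eq]
    by_cases hm : PySem.Str.len m < L
    · rw [if_pos hm]
      have hnone : gs.find? (pvCond L m) = none := by
        rw [List.find?_eq_none]
        intro g hg
        unfold pvCond
        rw [decide_eq_false (not_le.mpr hm), Bool.false_and, Bool.false_and]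
        exact Bool.false_ne_true
      rw [hnone]
    · rw [if_neg hm]
      have hmle : L ≤ PySem.Str.len m := not_lt.mp hm
      have hQ0 : pvIsFirst
          (fun i => ∃ h : i < gs.length,
            (decide (L ≤ PySem.Str.len gs[i]) && PySem.Str.startswith gs[i] m) = true)
          (((PySem.List.enumerate gs 0).foldl (pvB_step L) (PySem.Dict.empty, PySem.Dict.empty)).2.get? m) := by
        have h2 := (pvB_dicts_get? L gs 0 PySem.Dict.empty PySem.Dict.empty m).2
        rw [PySem.Dict.get?_empty, Option.none_or] at h2
        rw [h2]
        exact pv_enumerate_find?_isFirst gs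
          (fun g => decide (L ≤ PySem.Str.len g) && PySem.Str.startswith g m)
      have hQE : ∀ k ∈ PySem.List.pyRange (max L 0) (PySem.Str.len m) 1,
          pvIsFirst
            (fun i => ∃ h : i < gs.length,
              (decide (L ≤ PySem.Str.len gs[i]) && (gs[i] == PySem.Str.slice m none (some k))) = true)
            (((PySem.List.enumerate gs 0).foldl (pvB_step L) (PySem.Dict.empty, PySem.Dict.empty)).1.get?
              (PySem.Str.slice m none (some k))) := by
        intro k _
        have h1 := (pvB_dicts_get? L gs 0 PySem.Dict.empty PySem.Dict.empty
          (PySem.Str.slice m none (some k))).1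
        rw [PySem.Dict.get?_empty, Option.none_or] at h1
        rw [h1]
        exact pv_enumerate_find?_isFirst gs
          (fun g => decide (L ≤ PySem.Str.len g) && (g == PySem.Str.slice m none (some k)))
      have hbb : pvB_best
            ((PySem.List.enumerate gs 0).foldl (pvB_step L) (PySem.Dict.empty, PySem.Dict.empty)).1
            (max L 0) m
            (((PySem.List.enumerate gs 0).foldl (pvB_step L) (PySem.Dict.empty, PySem.Dict.empty)).2.get? m)
          = (PySem.List.pyRange (max L 0) (PySem.Str.len m) 1).foldl
              (fun best k => pvMin2 best
                (((PySem.List.enumerate gs 0).foldl (pvB_step L) (PySem.Dict.empty, PySem.Dict.empty)).1.get?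
                  (PySem.Str.slice m none (some k)))) 
              (((PySem.List.enumerate gs 0).foldl (pvB_step L) (PySem.Dict.empty, PySem.Dict.empty)).2.get? m) := by
        rfl
      have hbest := pv_minFold_isFirst (PySem.List.pyRange (max L 0) (PySem.Str.len m) 1)
        (fun k => ((PySem.List.enumerate gs 0).foldl (pvB_step L) (PySem.Dict.empty, PySem.Dict.empty)).1.get?
          (PySem.Str.slice m none (some k)))
        (fun k i => ∃ h : i < gs.length,
          (decide (L ≤ PySem.Str.len gs[i]) && (gs[i] == PySem.Str.slice m none (some k))) = true)
        hQE _ _ hQ0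
      rw [← hbb] at hbest
      have hcond : pvIsFirst (fun i => ∃ h : i < gs.length, pvCond L m gs[i] = true)
          (pvB_best
            ((PySem.List.enumerate gs 0).foldl (pvB_step L) (PySem.Dict.empty, PySem.Dict.empty)).1
            (max L 0) m
            (((PySem.List.enumerate gs 0).foldl (pvB_step L) (PySem.Dict.empty, PySem.Dict.empty)).2.get? m)) := by
        refine pvIsFirst_congr (fun i => ?_) hbest
        constructor
        · rintro (⟨h, hb⟩ | ⟨k, hk, h, hb⟩)
          · exact ⟨h, (pv_union_iff_cond L m gs[i] hmle).mp (Or.inl hb)⟩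
          · exact ⟨h, (pv_union_iff_cond L m gs[i] hmle).mp (Or.inr ⟨k, hk, hb⟩)⟩
        · rintro ⟨h, hc⟩
          rcases (pv_union_iff_cond L m gs[i] hmle).mpr hc with hb | ⟨k, hk, hb⟩
          · exact Or.inl ⟨h, hb⟩
          · exact Or.inr ⟨k, hk, h, hb⟩
      have heq := pvIsFirst_unique hcond (pv_findIdx?_isFirst gs (pvCond L m))
      rw [heq]
      cases hfix : gs.findIdx? (pvCond L m) with
      | none =>
        rw [List.findIdx?_eq_none_iff] at hfix
        have hfn : gs.find? (pvCond L m) = none := by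
          rw [List.find?_eq_none]
          intro g hg hb
          rw [hfix g hg] at hb
          cases hb
        rw [hfn]
        rfl
      | some i =>
        obtain ⟨hlt, hp, hmin⟩ := List.findIdx?_eq_some_iff_getElem.mp hfix
        have hfind : gs.find? (pvCond L m) = some gs[i] := by
          rw [List.find?_eq_some_iff_getElem]
          exact ⟨hp, i, hlt, rfl, fun j hj => by simpa using hmin j hj⟩
        rw [hfind]
        show PySem.Set.add acc (m ++ "~" ++ gs[i])
          = PySem.Set.add acc (m ++ "~" ++ PySem.List.pyGetD gs ((i : Nat) : Int) "")
        have hget : PySem.List.pyGetD gs ((i : Nat) : Int) "" = gs[i] := by simp [hlt]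
        rw [hget]
  have hmain : ∀ (l : List String) (acc : PySem.Set String),
      l.foldl (fun mset m => pvA_inner L m gs mset) acc =
      l.foldl (fun mset m =>
        if PySem.Str.len m < L then mset
        else
          match pvB_best
              ((PySem.List.enumerate gs 0).foldl (pvB_step L) (PySem.Dict.empty, PySem.Dict.empty)).1
              (max L 0) m
              (((PySem.List.enumerate gs 0).foldl (pvB_step L) (PySem.Dict.empty, PySem.Dict.empty)).2.get? m) with
          | none => mset
          | some j => PySem.Set.add mset (m ++ "~" ++ PySem.List.pyGetD gs j "")) acc := by
    intro l
    induction l with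
    | nil => intro acc; rfl
    | cons x xs ih =>
      intro acc
      simp only [List.foldl_cons]
      rw [hstep acc x]
      exact ih _
  exact hmain ms PySem.Set.empty
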